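-- pv_equiv track=rewrite | github.com/danielrfry/opl2sd1 | vgmplay/opl.py | get_op_reg_offsets
-- ===== SOURCE A (Python) =====
-- def get_op_reg_offsets(ch, op4=False):
--     if op4:
--         ch1 = ((ch // 3) * 9) + (ch % 3)
--         ch2 = ch1 + 3
--         return (*get_op_reg_offsets(ch1), *get_op_reg_offsets(ch2))
--     else:
--         reg_base = 0x100 if ch >= 9 else 0
--         ch = ch % 9
--         reg_base = reg_base + ((ch // 3) * 8) + (ch % 3)
--         return (reg_base, reg_base + 3)
-- ===== SOURCE B (Python) =====
-- def get_op_reg_offsets(ch, op4=False):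
--     n = 4 if op4 else 2
--     out = []
--     for i in range(n):
--         c = ((ch // 3) * 9 + ch % 3 + 3 * (i // 2)) if op4 else ch
--         bank = 0x100 if c >= 9 else 0
--         c %= 9
--         out.append(bank + c + 5 * (c // 3) + 3 * (i % 2))
--     return tuple(out)
-- ===== Notes on version B (the rewrite author's own statement) =====
-- stated objective: alternative
-- what changed: B replaces A's pair-building recursion-and-concatenation by a single flat loop over the output index i (2 or 4 slots), computing each register offset directly from i via c = ch1 + 3*(i//2) and op slot 3*(i%2), with the base written as bank + c + 5*(c//3) instead of 8*(c//3) + c%3.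
import Mathlib
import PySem

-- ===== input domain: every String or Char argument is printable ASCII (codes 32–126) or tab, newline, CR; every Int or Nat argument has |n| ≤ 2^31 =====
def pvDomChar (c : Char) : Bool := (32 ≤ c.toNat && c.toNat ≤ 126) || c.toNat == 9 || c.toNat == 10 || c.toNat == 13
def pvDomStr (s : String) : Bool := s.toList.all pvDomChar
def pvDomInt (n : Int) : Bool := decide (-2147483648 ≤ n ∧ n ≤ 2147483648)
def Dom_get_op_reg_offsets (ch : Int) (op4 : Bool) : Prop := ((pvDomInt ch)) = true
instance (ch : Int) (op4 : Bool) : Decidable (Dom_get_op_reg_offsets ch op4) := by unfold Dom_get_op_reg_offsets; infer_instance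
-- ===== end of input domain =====

-- B replaces A's recursion-and-pair-concatenation by one flat loop over the output
-- index, computing each offset directly from it (objective: alternative, same cost).

-- ===== PORT A =====
def get_op_reg_offsets (ch : Int) (op4 : Bool) : List Int :=
  if op4 then
    let ch1 := (PySem.Int.floordiv ch 3) * 9 + PySem.Int.mod ch 3
    let ch2 := ch1 + 3
    get_op_reg_offsets ch1 false ++ get_op_reg_offsets ch2 false
  else
    let reg_base : Int := if ch ≥ 9 then 0x100 else 0
    let ch' := PySem.Int.mod ch 9
    let reg_base := reg_base + (PySem.Int.floordiv ch' 3) * 8 + PySem.Int.mod ch' 3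
    [reg_base, reg_base + 3]
termination_by (if op4 then 1 else 0)
decreasing_by all_goals simp_all

-- ===== PORT B =====
-- body of B's loop for output index i
def pvSlot (ch : Int) (op4 : Bool) (i : Int) : Int :=
  let c := if op4 then (PySem.Int.floordiv ch 3) * 9 + PySem.Int.mod ch 3
                        + 3 * (PySem.Int.floordiv i 2)
           else ch
  let bank : Int := if c ≥ 9 then 0x100 else 0
  let c' := PySem.Int.mod c 9
  bank + c' + 5 * (PySem.Int.floordiv c' 3) + 3 * (PySem.Int.mod i 2)

def get_op_reg_offsets_alt (ch : Int) (op4 : Bool) : List Int :=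
  let n : Int := if op4 then 4 else 2
  (PySem.List.pyRange 0 n 1).foldl (fun out i => out ++ [pvSlot ch op4 i]) []

-- ===== PRECONDITION & SPEC =====
def Spec_get_op_reg_offsets (ch : Int) (op4 : Bool) (out : List Int) : Prop := out = get_op_reg_offsets_alt ch op4
instance (ch : Int) (op4 : Bool) (out : List Int) : Decidable (Spec_get_op_reg_offsets ch op4 out) := by unfold Spec_get_op_reg_offsets; infer_instance

-- ===== CLAIM (what is proved, stated in full; the proofs are below) =====
def Claim_equal_get_op_reg_offsets : Prop := ∀ (ch : Int) (op4 : Bool), Dom_get_op_reg_offsets ch op4 → Spec_get_op_reg_offsets ch op4 (get_op_reg_offsets ch op4)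

-- ===== LEMMAS AND PROOFS =====
-- B's foldl over range(2)/range(4) unrolled to explicit lists of slots
theorem alt_pair_form (ch : Int) :
    get_op_reg_offsets_alt ch false = [pvSlot ch false 0, pvSlot ch false 1] := by
  unfold get_op_reg_offsets_alt
  simp [PySem.List.pyRange_one, List.range_succ]

theorem alt_quad_form (ch : Int) :
    get_op_reg_offsets_alt ch true
      = [pvSlot ch true 0, pvSlot ch true 1, pvSlot ch true 2, pvSlot ch true 3] := by
  unfold get_op_reg_offsets_alt
  simp [PySem.List.pyRange_one, List.range_succ]

-- A's 2-op branch equals B's slot formula at indices i and i+... : for any channel c,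
-- A's pair [b, b+3] equals [pvSlot on an even index, pvSlot on the following odd index].
theorem slot_base (c : Int) :
    PySem.Int.mod c 9 + 5 * (PySem.Int.floordiv (PySem.Int.mod c 9) 3)
      = (PySem.Int.floordiv (PySem.Int.mod c 9) 3) * 8 + PySem.Int.mod (PySem.Int.mod c 9) 3 := by
  have h0 : 0 ≤ PySem.Int.mod c 9 := PySem.Int.mod_nonneg c (by norm_num)
  have h9 : PySem.Int.mod c 9 < 9 := PySem.Int.mod_lt c (by norm_num)
  set m := PySem.Int.mod c 9 with hm
  interval_cases m <;> decide

theorem pair_eq_slots (c : Int) (op4 : Bool) (ch i : Int)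
    (hc : (if op4 then (PySem.Int.floordiv ch 3) * 9 + PySem.Int.mod ch 3
                        + 3 * (PySem.Int.floordiv i 2) else ch) = c)
    (hi : PySem.Int.mod i 2 = 0) (hj : PySem.Int.mod (i + 1) 2 = 1)
    (hq : PySem.Int.floordiv (i + 1) 2 = PySem.Int.floordiv i 2) :
    get_op_reg_offsets c false = [pvSlot ch op4 i, pvSlot ch op4 (i + 1)] := by
  rw [get_op_reg_offsets]
  simp only [if_neg Bool.false_ne_true]
  simp only [pvSlot, hc, hi, hj, hq]
  have := slot_base c
  by_cases hb : c ≥ 9 <;> simp only [hb, if_true, if_false, List.cons.injEq, and_true] <;>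
    constructor <;> omega

theorem get_op_reg_offsets_spec : Claim_equal_get_op_reg_offsets := by
  intro ch op4 _
  unfold Spec_get_op_reg_offsets
  cases op4 with
  | false =>
    have h := pair_eq_slots ch false ch 0 (by simp) (by decide) (by decide) (by decide)
    rw [h, alt_pair_form]
    norm_num
  | true =>
    have hA : get_op_reg_offsets ch true
        = get_op_reg_offsets ((PySem.Int.floordiv ch 3) * 9 + PySem.Int.mod ch 3) false
          ++ get_op_reg_offsets ((PySem.Int.floordiv ch 3) * 9 + PySem.Int.mod ch 3 + 3) false := by
      rw [get_op_reg_offsets]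
      rfl
    have h1 := pair_eq_slots ((PySem.Int.floordiv ch 3) * 9 + PySem.Int.mod ch 3) true ch 0
      (by simp) (by decide) (by decide) (by decide)
    have h2 := pair_eq_slots ((PySem.Int.floordiv ch 3) * 9 + PySem.Int.mod ch 3 + 3) true ch 2
      (by simp) (by decide) (by decide) (by decide)
    rw [hA, h1, h2, alt_quad_form]
    norm_num
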